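-- pv_equiv track=rewrite | github.com/pc5401/my_BOJ | 백준/Silver/24913. 개표/개표.py | solve
-- ===== SOURCE A (Python) =====
-- def solve(N: int, votes: list[int]) -> list[str]:
--     others = [0] * N
--     others_sum = 0
--     others_max = 0
--     me = 0
--     result = []
--     for typ, a, b in votes:
--         if typ == 1:
--             if b <= N:
--                 idx = b - 1
--                 others[idx] += a
--                 others_sum += a
--                 if others[idx] > others_max:
--                     others_max = others[idx]
--             else:
--                 me += a
--         else:
--             new_me = me + a
--             y = b
--             m = others_max
--             required = N * m - others_sum
--             if y <= required:
--                 new_max = m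
--             else:
--                 remainder = y - required
--                 inc = (remainder + N - 1) // N
--                 new_max = m + inc
--             result.append("YES" if new_me > new_max else "NO")
--     return result
-- ===== SOURCE B (Python) =====
-- def solve(N: int, votes: list[int]) -> list[str]:
--     def tally(prefix):
--         others = [0] * N
--         me = 0
--         for typ, a, b in prefix:
--             if typ == 1:
--                 if b <= N:
--                     others[b - 1] += a
--                 else:
--                     me += a
--         return others, me
--
--     seen = []
--     result = []
--     for vote in votes:
--         typ, a, b = vote
--         if typ != 1:
--             others, me = tally(seen)
--             m = max(others, default=0)
--             required = N * m - sum(others)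
--             if b > required:
--                 m += (b - required + N - 1) // N
--             result.append("YES" if me + a > m else "NO")
--         seen.append(vote)
--     return result
-- ===== Notes on version B (the rewrite author's own statement) =====
-- stated objective: alternative
-- what changed: B keeps no running election state at all: it accumulates the raw prefix of processed votes and, at each type-2 query, recomputes the tally array, me, sum and max from scratch with a tally helper, replacing A's single stateful pass with incrementally maintained aggregates by staged per-query recomputation; Pre_ excludes type-1 votes with negative amounts (outside the natural domain of vote counts, where A's monotone running max and a fresh max are both defensible) plus the inputs where A raises (out-of-range candidate index, N=0 with a positive-threshold query).
-- outside the precondition, e.g. on solve(1, [(1, -5, 1), (2, 0, 0)]): A returns ['NO'], B returns ['YES']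
import Mathlib
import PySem

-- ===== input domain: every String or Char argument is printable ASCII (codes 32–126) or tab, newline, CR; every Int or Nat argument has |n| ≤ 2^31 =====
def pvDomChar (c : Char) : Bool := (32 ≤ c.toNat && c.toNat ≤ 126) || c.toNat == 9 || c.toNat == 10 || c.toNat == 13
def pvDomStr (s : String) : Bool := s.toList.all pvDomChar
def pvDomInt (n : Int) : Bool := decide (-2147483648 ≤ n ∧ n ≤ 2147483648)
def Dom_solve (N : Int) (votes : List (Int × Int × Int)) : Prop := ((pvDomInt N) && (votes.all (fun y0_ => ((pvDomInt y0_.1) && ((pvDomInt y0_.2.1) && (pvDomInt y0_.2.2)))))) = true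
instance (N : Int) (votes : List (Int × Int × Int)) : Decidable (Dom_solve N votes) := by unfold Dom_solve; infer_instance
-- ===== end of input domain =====

-- B keeps no running election state: it records the raw prefix of processed votes and
-- recomputes the tally, me, sum and max from scratch at each query; equivalence is
-- proved on nonnegative vote amounts with in-range candidate numbers (Pre_solve below).

-- ===== PORT A =====
-- one iteration of A's for-loop over state (others, others_sum, others_max, me, result)
def stepA (N : Int) (st : List Int × Int × Int × Int × List String) (v : Int × Int × Int) :
    List Int × Int × Int × Int × List String :=
  match v, st with
  | (typ, a, b), (others, osum, omax, me, res) =>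
    if typ = 1 then
      if b ≤ N then
        -- others[b-1] += a  (Python negative-index semantics; IndexError excluded by Pre_solve)
        let nv := PySem.List.pyGetD others (b - 1) 0 + a
        (PySem.List.pySetD others (b - 1) nv, osum + a,
         if nv > omax then nv else omax, me, res)
      else (others, osum, omax, me + a, res)
    else
      let newMe := me + a
      let required := N * omax - osum
      let newMax :=
        if b ≤ required then omax
        else omax + PySem.Int.floordiv (b - required + N - 1) N
      (others, osum, omax, me, res ++ [if newMe > newMax then "YES" else "NO"])

def solve (N : Int) (votes : List (Int × Int × Int)) : List String :=
  (votes.foldl (stepA N) (List.replicate N.toNat 0, 0, 0, 0, [])).2.2.2.2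

-- ===== PORT B =====
-- one iteration of B's tally helper: fold a prefix of votes into (others, me)
def tStep (N : Int) (st : List Int × Int) (v : Int × Int × Int) : List Int × Int :=
  match v, st with
  | (typ, a, b), (others, me) =>
    if typ = 1 then
      if b ≤ N then
        (PySem.List.pySetD others (b - 1) (PySem.List.pyGetD others (b - 1) 0 + a), me)
      else (others, me + a)
    else (others, me)

-- B's tally(prefix): rebuild (others, me) from scratch from the recorded prefix
def tallyB (N : Int) (pre : List (Int × Int × Int)) : List Int × Int :=
  pre.foldl (tStep N) (List.replicate N.toNat 0, 0)

-- max(others, default=0)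
def mxInt (l : List Int) : Int := (PySem.List.max? l (fun x => x)).getD 0

-- one iteration of B's main loop over state (seen, result)
def stepB (N : Int) (st : List (Int × Int × Int) × List String) (v : Int × Int × Int) :
    List (Int × Int × Int) × List String :=
  match v, st with
  | (typ, a, b), (seen, res) =>
    let res' :=
      if typ ≠ 1 then
        let t := tallyB N seen
        let m := mxInt t.1
        let required := N * m - t.1.sum
        let m' := if required < b then m + PySem.Int.floordiv (b - required + N - 1) N else m
        res ++ [if m' < t.2 + a then "YES" else "NO"]
      else res
    (seen ++ [(typ, a, b)], res')

def solve_alt (N : Int) (votes : List (Int × Int × Int)) : List String :=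
  (votes.foldl (stepB N) ([], [])).2

-- ===== PRECONDITION & SPEC =====
-- Pre_solve excludes (i) type-1 votes whose candidate number is out of range (A raises
-- IndexError), (ii) queries with N = 0 and b > 0 (A raises ZeroDivisionError), and
-- (iii) type-1 votes with a negative amount, which lie outside the natural domain of
-- vote counts and on which the two aggregation strategies are both defensible.
def Pre_solve (N : Int) (votes : List (Int × Int × Int)) : Prop :=
  ((votes.all fun v =>
      !(decide (v.1 = 1) && decide (v.2.2 ≤ N)) || (decide (0 ≤ v.2.1) && decide (1 - N ≤ v.2.2))) &&
   (!(decide (N = 0)) || votes.all fun v => decide (v.1 = 1) || decide (v.2.2 ≤ 0))) = true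
instance (N : Int) (votes : List (Int × Int × Int)) : Decidable (Pre_solve N votes) := by
  unfold Pre_solve; infer_instance

def pvWitness_solve : Int × (List (Int × Int × Int)) := (2, [(1, 3, 1), (1, 4, 3), (2, 5, 2)])

def Spec_solve (N : Int) (votes : List (Int × Int × Int)) (out : List String) : Prop := out = solve_alt N votes
instance (N : Int) (votes : List (Int × Int × Int)) (out : List String) : Decidable (Spec_solve N votes out) := by unfold Spec_solve; infer_instance

-- ===== CLAIM (what is proved, stated in full; the proofs are below) =====
def Claim_equal_solve : Prop := ∀ (N : Int) (votes : List (Int × Int × Int)), Dom_solve N votes → Pre_solve N votes → Spec_solve N votes (solve N votes)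

-- ===== LEMMAS AND PROOFS =====

-- folding max over a list commutes with taking max into the accumulator
lemma foldl_max_acc (t : List Int) : ∀ (x y : Int), t.foldl max (max x y) = max (t.foldl max x) y := by
  induction t with
  | nil => intro x y; simp
  | cons c t ih =>
      intro x y
      simp only [List.foldl_cons]
      have h1 : max (max x y) c = max (max x c) y := by
        simp [max_def]; split_ifs <;> omega
      rw [h1, ih]

-- replacing an element by something at least as large turns the fold-max into a max
lemma foldl_max_set (t : List Int) : ∀ (j : Nat) (x nv : Int), (hj : j < t.length) →
    t[j] ≤ nv → (t.set j nv).foldl max x = max (t.foldl max x) nv := by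
  induction t with
  | nil => intro j x nv hj; simp at hj
  | cons c t ih =>
      intro j x nv hj hle
      cases j with
      | zero =>
          simp only [List.set_cons_zero, List.foldl_cons]
          simp only [List.getElem_cons_zero] at hle
          have h1 : t.foldl max (max x nv) = max (t.foldl max x) nv := foldl_max_acc t x nv
          have h2 : t.foldl max (max x c) = max (t.foldl max x) c := foldl_max_acc t x c
          rw [h1, h2]
          simp [max_def]; split_ifs <;> omega
      | succ k =>
          simp only [List.set_cons_succ, List.foldl_cons]
          simp only [List.length_cons] at hj
          simp only [List.getElem_cons_succ] at hle
          exact ih k (max x c) nv (by omega) hle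

lemma mx_set (l : List Int) (j : Nat) (nv : Int) (hj : j < l.length) (hle : l[j] ≤ nv) :
    mxInt (l.set j nv) = max (mxInt l) nv := by
  cases l with
  | nil => simp at hj
  | cons x t =>
      cases j with
      | zero =>
          simp only [List.set_cons_zero, mxInt, PySem.List.max?_id_cons, Option.getD_some]
          simp only [List.getElem_cons_zero] at hle
          have := foldl_max_acc t x nv
          rw [← this]
          have : max x nv = nv := by omega
          rw [this]
      | succ k =>
          simp only [List.set_cons_succ, mxInt, PySem.List.max?_id_cons, Option.getD_some]
          simp only [List.length_cons] at hj
          simp only [List.getElem_cons_succ] at hle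
          exact foldl_max_set t k x nv (by omega) hle

lemma sum_set_add (l : List Int) : ∀ (j : Nat) (a : Int), (hj : j < l.length) →
    (l.set j (l[j] + a)).sum = l.sum + a := by
  induction l with
  | nil => intro j a hj; simp at hj
  | cons c t ih =>
      intro j a hj
      cases j with
      | zero => simp [List.set_cons_zero]; ring
      | succ k =>
          simp only [List.length_cons] at hj
          simp only [List.set_cons_succ, List.getElem_cons_succ, List.sum_cons]
          rw [ih k a (by omega)]
          ring

lemma mx_replicate_zero (n : Nat) : mxInt (List.replicate n (0 : Int)) = 0 := by
  cases n with
  | zero => rfl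
  | succ m =>
      simp only [List.replicate_succ, mxInt, PySem.List.max?_id_cons, Option.getD_some]
      induction m with
      | zero => rfl
      | succ k ih => simpa [List.replicate_succ, List.foldl_cons] using ih

-- an in-range Python index resolves to a plain Nat index for both get and set
lemma pyIdx_resolve (l : List Int) (i : Int) (h : PySem.Raise.InRange l.length i) :
    ∃ j : Nat, ∃ _ : j < l.length, PySem.List.pyGetD l i 0 = l.getD j 0 ∧
      ∀ v, PySem.List.pySetD l i v = l.set j v := by
  have hne : PySem.List.pyGet? l i ≠ none := by
    intro hc
    rw [PySem.List.pyGet?_eq_none_iff] at hc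
    exact hc h
  cases hk : PySem.List.pyIdx? l.length i with
  | none =>
      exfalso; apply hne
      simp [PySem.List.pyGet?, hk]
  | some j =>
      have hget : PySem.List.pyGet? l i = l[j]? := by
        simp [PySem.List.pyGet?, hk]
      have hj : j < l.length := by
        by_contra hge
        apply hne
        rw [hget, List.getElem?_eq_none (by omega)]
      refine ⟨j, hj, ?_, ?_⟩
      · simp [PySem.List.pyGetD, hget, List.getElem?_eq_getElem hj]
      · intro v
        simp [PySem.List.pySetD, PySem.List.pySet?, hk]

-- appending one vote to the recorded prefix advances B's tally by one tStep
lemma tally_snoc (N : Int) (p : List (Int × Int × Int)) (v : Int × Int × Int) :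
    tallyB N (p ++ [v]) = tStep N (tallyB N p) v := by
  simp [tallyB, List.foldl_append]

-- main loop invariant: A's running state (others, osum, omax, me) coincides with the
-- fresh recomputation tallyB/sum/mxInt of the recorded prefix `seen`, so both loops
-- emit the same answers
lemma loop_eq (N : Int) : ∀ (rest seen : List (Int × Int × Int)) (others : List Int)
    (osum omax me : Int) (res : List String),
    (∀ v ∈ rest, v.1 = 1 → v.2.2 ≤ N → (0 ≤ v.2.1 ∧ 1 - N ≤ v.2.2)) →
    others.length = N.toNat →
    osum = others.sum → omax = mxInt others →
    tallyB N seen = (others, me) →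
    (rest.foldl (stepB N) (seen, res)).2 =
      (rest.foldl (stepA N) (others, osum, omax, me, res)).2.2.2.2 := by
  intro rest
  induction rest with
  | nil => intro seen others osum omax me res _ _ _ _ _; rfl
  | cons v rest ih =>
      intro seen others osum omax me res hpre hlen hsum hmax htal
      obtain ⟨typ, a, b⟩ := v
      simp only [List.foldl_cons]
      have hrest : ∀ v ∈ rest, v.1 = 1 → v.2.2 ≤ N → (0 ≤ v.2.1 ∧ 1 - N ≤ v.2.2) :=
        fun v hv => hpre v (List.mem_cons_of_mem _ hv)
      have hsnoc : tallyB N (seen ++ [(typ, a, b)]) = tStep N (others, me) (typ, a, b) := by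
        rw [tally_snoc, htal]
      by_cases h1 : typ = 1
      · by_cases h2 : b ≤ N
        · have hpv := hpre (typ, a, b) List.mem_cons_self h1 h2
          have ha : 0 ≤ a := hpv.1
          have hb : 1 - N ≤ b := hpv.2
          have hrange : PySem.Raise.InRange others.length (b - 1) := by
            unfold PySem.Raise.InRange; omega
          obtain ⟨j, hj, hget, hset⟩ := pyIdx_resolve others (b - 1) hrange
          rw [List.getD_eq_getElem others 0 hj] at hget
          simp only [tStep, if_pos h1, if_pos h2] at hsnoc
          rw [hget, hset] at hsnoc
          simp only [stepA, stepB, if_pos h1, if_pos h2, if_neg (by simp [h1] : ¬ typ ≠ 1),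
            hget, hset]
          apply ih
          · exact hrest
          · rw [List.length_set, hlen]
          · rw [hsum]; exact (sum_set_add others j a hj).symm
          · rw [mx_set others j (others[j] + a) hj (by omega), hmax]
            rcases max_cases (mxInt others) (others[j] + a) with ⟨he, hc⟩ | ⟨he, hc⟩ <;>
              rw [he] <;> split_ifs <;> omega
          · exact hsnoc
        · simp only [tStep, if_pos h1, if_neg h2] at hsnoc
          simp only [stepA, stepB, if_pos h1, if_neg h2, if_neg (by simp [h1] : ¬ typ ≠ 1)]
          exact ih (seen ++ [(typ, a, b)]) others osum omax (me + a) res hrest hlen hsum hmax hsnoc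
      · simp only [tStep, if_neg h1] at hsnoc
        simp only [stepA, stepB, if_neg h1, if_pos (by simp [h1] : typ ≠ 1), htal]
        have hm : mxInt others = omax := hmax.symm
        have hs : others.sum = osum := hsum.symm
        rw [hm, hs]
        have hbr : (if N * omax - osum < b then
              omax + PySem.Int.floordiv (b - (N * omax - osum) + N - 1) N else omax) =
            (if b ≤ N * omax - osum then omax
              else omax + PySem.Int.floordiv (b - (N * omax - osum) + N - 1) N) := by
          split_ifs <;> omega
        rw [hbr]
        exact ih (seen ++ [(typ, a, b)]) others osum omax me _ hrest hlen hsum hmax hsnoc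

-- ===== VERDICT (by name: the statement is the Claim_ definition above) =====
theorem solve_spec : Claim_equal_solve := by
  intro N votes _ hpre
  unfold Pre_solve at hpre
  rw [Bool.and_eq_true] at hpre
  have h1 : ∀ v ∈ votes, v.1 = 1 → v.2.2 ≤ N → (0 ≤ v.2.1 ∧ 1 - N ≤ v.2.2) := by
    intro v hv hv1 hv2
    have := List.all_eq_true.mp hpre.1 v hv
    simp only [Bool.or_eq_true, Bool.not_eq_true', Bool.and_eq_true, Bool.and_eq_false_iff,
      decide_eq_true_eq, decide_eq_false_iff_not] at this
    rcases this with h | h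
    · rcases h with h | h <;> exact absurd (by assumption) h
    · exact h
  unfold Spec_solve solve solve_alt
  exact (loop_eq N votes [] (List.replicate N.toNat 0) 0 0 0 [] h1
    (by simp) (by simp) (mx_replicate_zero N.toNat).symm rfl).symm
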